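-- pv_equiv track=rewrite | github.com/miliar/Code_Jam_Webscraper | solutions_python/Problem_178/4247.py | solve
-- ===== SOURCE A (Python) =====
-- def solve(cakes,tries):
--     if cakes == "+"*len(cakes):
--         return str(tries)
--     fpc = cakes[0]
--     i = 1
--     while (i < len(cakes) and cakes[i] == fpc):
--         i += 1
--     flip = "".join(map(lambda x: '+' if x == "-" else "-", reversed(list(cakes[0:i]))))
--     cakes = flip + cakes[i:]
--     return solve(cakes,tries+1)
-- ===== SOURCE B (Python) =====
-- def solve(cakes, tries):
--     # compress the string to its sequence of runs, then walk that short list: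
--     # flip the current run, folding it into the next run when the sides coincide
--     runs = [cakes[0]] + [b for a, b in zip(cakes, cakes[1:]) if a != b] if cakes else []
--     cur = runs[0] if runs else '+'
--     i = 0
--     flips = 0
--     while i < len(runs) - 1 or cur != '+':
--         cur = '+' if cur == '-' else '-'
--         flips += 1
--         if i < len(runs) - 1 and runs[i + 1] == cur:
--             i += 1
--             cur = runs[i]
--     return str(tries + flips)
-- ===== Notes on version B (the rewrite author's own statement) =====
-- stated objective: faster
-- what changed: replaced A's recursion that rebuilds the whole string for every flip by one run-length compression followed by an index walk over the short run list (flip the current run, folding it into the next when the sides coincide); Pre_ excludes exactly the inputs on which A recurses forever (an invalid character after the first run of equal characters)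
import Mathlib
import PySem

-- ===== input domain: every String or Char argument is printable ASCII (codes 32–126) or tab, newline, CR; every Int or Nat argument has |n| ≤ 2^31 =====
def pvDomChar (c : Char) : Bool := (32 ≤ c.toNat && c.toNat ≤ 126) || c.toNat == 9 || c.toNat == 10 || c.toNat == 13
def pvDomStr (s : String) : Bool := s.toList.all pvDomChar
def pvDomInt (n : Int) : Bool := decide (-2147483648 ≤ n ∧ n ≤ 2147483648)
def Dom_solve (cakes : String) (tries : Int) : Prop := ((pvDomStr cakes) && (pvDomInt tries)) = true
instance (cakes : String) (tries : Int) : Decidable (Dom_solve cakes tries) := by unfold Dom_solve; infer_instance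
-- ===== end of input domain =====

-- B replaces A's flip-and-recurse on whole strings (quadratic in the worst case) by one
-- run-length compression followed by an index walk over the short run list (linear).

-- ===== PORT A =====
-- the while loop of A, counting how many further leading chars equal fpc
def pvRunLen (fpc : Char) : List Char → Nat
  | [] => 0
  | c :: cs => if c = fpc then pvRunLen fpc cs + 1 else 0

-- A's recursion, with a fuel guard only to make the same computation total in Lean
-- (Pre_solve guarantees the fuel is never exhausted).
def pvSolveA (fuel : Nat) (l : List Char) (tries : Int) : String :=
  match fuel with
  | 0 => ""
  | fuel + 1 =>
    if l = List.replicate l.length '+' then PySem.Int.toStr tries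
    else
      match l with
      | [] => ""   -- unreachable: [] = replicate 0 '+'
      | fpc :: t =>
        let i := 1 + pvRunLen fpc t
        let flip := ((fpc :: t).take i).reverse.map (fun x => if x = '-' then '+' else '-')
        pvSolveA fuel (flip ++ (fpc :: t).drop i) (tries + 1)

def solve (cakes : String) (tries : Int) : String :=
  pvSolveA (cakes.toList.length + 2) cakes.toList tries

-- ===== PORT B =====
-- Source B's comprehension [b for a, b in zip(cakes, cakes[1:]) if a != b]
def pvDestTail (prev : Char) : List Char → List Char
  | [] => []
  | c :: t => if prev ≠ c then c :: pvDestTail c t else pvDestTail c t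

-- Source B's runs = [cakes[0]] + comprehension (or [] for an empty string)
def pvRunsOf : List Char → List Char
  | [] => []
  | a :: t => a :: pvDestTail a t

-- Source B's while loop, with a fuel guard only to make the same computation total in Lean
-- (Pre_solve guarantees the fuel is never exhausted). 'i < len(runs) - 1' is exact here:
-- for an empty runs list both Python (-1) and Nat subtraction (0) make it false.
def pvFlipLoop (fuel : Nat) (runs : List Char) (i : Nat) (cur : Char) (flips : Nat) : Nat :=
  match fuel with
  | 0 => flips
  | fuel + 1 =>
    if i < runs.length - 1 ∨ cur ≠ '+' then
      let cur' := if cur = '-' then '+' else '-'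
      if i < runs.length - 1 ∧ runs.getD (i + 1) ' ' = cur' then
        pvFlipLoop fuel runs (i + 1) (runs.getD (i + 1) ' ') (flips + 1)
      else
        pvFlipLoop fuel runs i cur' (flips + 1)
    else flips

def solve_alt (cakes : String) (tries : Int) : String :=
  let runs := pvRunsOf cakes.toList
  let cur := runs.headD '+'
  PySem.Int.toStr (tries + (pvFlipLoop (2 * runs.length + 2) runs 0 cur 0 : Int))

-- ===== PRECONDITION & SPEC =====
-- run-membership predicate shared by Pre_ and the lemmas below
def pvIsRun (c : Char) (x : Char) : Bool := x = c

-- Pre_ is A's termination domain: everything after the first run of equal characters must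
-- be '+'/'-'; on any other input A recurses forever (e.g. "+b": the lambda maps 'b' to '-',
-- but the first run never reaches 'b', so the string alternates "+b" / "-b" without end).
def Pre_solve (cakes : String) (tries : Int) : Prop :=
  ((cakes.toList.drop 1).dropWhile (pvIsRun (cakes.toList.headD ' '))).all
    (fun x => x = '+' || x = '-') = true
instance (cakes : String) (tries : Int) : Decidable (Pre_solve cakes tries) := by
  unfold Pre_solve; infer_instance

def pvWitness_solve : String × Int := ("-++--+-++-", 1)

def Spec_solve (cakes : String) (tries : Int) (out : String) : Prop := out = solve_alt cakes tries
instance (cakes : String) (tries : Int) (out : String) : Decidable (Spec_solve cakes tries out) := by unfold Spec_solve; infer_instance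

-- ===== CLAIM (what is proved, stated in full; the proofs are below) =====
def Claim_equal_solve : Prop := ∀ (cakes : String) (tries : Int), Dom_solve cakes tries → Pre_solve cakes tries → Spec_solve cakes tries (solve cakes tries)

-- ===== LEMMAS AND PROOFS =====

-- plain transition count of A's strings, and the number of flips A still has to make
def pvRuns : List Char → Nat
  | a :: b :: rest => (if a ≠ b then 1 else 0) + pvRuns (b :: rest)
  | _ => 0

def pvMu (l : List Char) : Nat :=
  pvRuns l + (if l.getLast? = some '-' then 1 else 0)

-- alternation of a run list, seen from a leading character
def pvAlt : Char → List Char → Prop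
  | _, [] => True
  | c, d :: t => c ≠ d ∧ pvAlt d t

lemma pvAlt_cons (c d : Char) (t : List Char) : pvAlt c (d :: t) ↔ c ≠ d ∧ pvAlt d t := Iff.rfl

lemma pvRuns_le (c : Char) (t : List Char) : pvRuns (c :: t) ≤ t.length := by
  induction t generalizing c with
  | nil => simp [pvRuns]
  | cons d t ih =>
    have := ih d
    simp only [pvRuns, List.length_cons]
    split <;> omega

lemma pvMu_le (l : List Char) : pvMu l ≤ l.length := by
  cases l with
  | nil => simp [pvMu, pvRuns]
  | cons c t =>
    have := pvRuns_le c t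
    unfold pvMu; split <;> simp <;> omega

lemma pvRunLen_le (c : Char) (t : List Char) : pvRunLen c t ≤ t.length := by
  induction t generalizing c with
  | nil => simp [pvRunLen]
  | cons d t ih =>
    have := ih c
    simp only [pvRunLen, List.length_cons]
    split <;> omega

lemma take_runLen (c : Char) (t : List Char) :
    (c :: t).take (1 + pvRunLen c t) = List.replicate (1 + pvRunLen c t) c := by
  induction t generalizing c with
  | nil => simp [pvRunLen]
  | cons d t ih =>
    by_cases h : d = c
    · subst h
      rw [show pvRunLen d (d :: t) = pvRunLen d t + 1 from by simp [pvRunLen],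
          show 1 + (pvRunLen d t + 1) = (1 + pvRunLen d t) + 1 by omega,
          List.take_succ_cons, List.replicate_succ]
      exact congrArg (d :: ·) (ih d)
    · simp [pvRunLen, h]

lemma dropWhile_eq_drop_runLen (c : Char) (t : List Char) :
    t.dropWhile (pvIsRun c) = t.drop (pvRunLen c t) := by
  induction t with
  | nil => simp [pvRunLen]
  | cons d t ih =>
    by_cases h : d = c
    · subst h; simpa [pvRunLen, pvIsRun] using ih
    · simp [pvRunLen, pvIsRun, h]

-- prepending copies of the head does not change the transition count
lemma pvRuns_replicate_cons (n : ℕ) (c : Char) (rest : List Char) :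
    pvRuns (List.replicate n c ++ (c :: rest)) = pvRuns (c :: rest) := by
  induction n with
  | zero => simp
  | succ n ih =>
    rw [List.replicate_succ, List.cons_append]
    cases hn : List.replicate n c ++ (c :: rest) with
    | nil => simp at hn
    | cons e es =>
      have he : e = c := by
        cases n with
        | zero => simp at hn; exact hn.1.symm
        | succ m => rw [List.replicate_succ] at hn; simp at hn; exact hn.1.symm
      have hstep : pvRuns (c :: e :: es) = pvRuns (e :: es) := by
        rw [show pvRuns (c :: e :: es) = (if c ≠ e then 1 else 0) + pvRuns (e :: es)
            from rfl, if_neg (by simp [he])]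
        omega
      rw [hstep, ← hn, ih]

lemma pvRuns_replicate_append (n : ℕ) (c : Char) (rest : List Char) :
    pvRuns (List.replicate (n + 1) c ++ rest) = pvRuns (c :: rest) := by
  have : List.replicate (n + 1) c ++ rest = List.replicate n c ++ (c :: rest) := by
    rw [List.replicate_succ']; simp
  rw [this, pvRuns_replicate_cons]

lemma pvRuns_replicate (n : ℕ) (c : Char) : pvRuns (List.replicate n c) = 0 := by
  cases n with
  | zero => simp [pvRuns]
  | succ m =>
    have := pvRuns_replicate_append m c []
    simpa [pvRuns] using this

lemma getLast?_replicate_succ (n : ℕ) (c : Char) :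
    (List.replicate (n + 1) c).getLast? = some c := by
  rw [← List.head?_reverse, List.reverse_replicate, List.replicate_succ]
  simp

lemma getLast?_append_cons (xs : List Char) (d : Char) (r : List Char) :
    (xs ++ d :: r).getLast? = (d :: r).getLast? := by
  rw [List.getLast?_append]
  cases h : (d :: r).getLast? with
  | none => simp at h
  | some v => simp

-- one-step unfoldings of pvSolveA (definitional)
lemma pvSolveA_succ_nil (fuel : Nat) (tries : Int) :
    pvSolveA (fuel + 1) [] tries = PySem.Int.toStr tries := rfl

lemma pvSolveA_succ (fuel : Nat) (fpc : Char) (t : List Char) (tries : Int) :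
    pvSolveA (fuel + 1) (fpc :: t) tries =
      if (fpc :: t) = List.replicate (fpc :: t).length '+' then PySem.Int.toStr tries
      else pvSolveA fuel
        ((((fpc :: t).take (1 + pvRunLen fpc t)).reverse.map
            (fun x => if x = '-' then '+' else '-')) ++
         (fpc :: t).drop (1 + pvRunLen fpc t)) (tries + 1) := rfl

-- drop of the run, restated through the while-loop counter
lemma drop_runLen (c : Char) (t : List Char) :
    (c :: t).drop (1 + pvRunLen c t) = [] ∨
    ∃ d r, (c :: t).drop (1 + pvRunLen c t) = d :: r ∧ d ≠ c := by
  induction t generalizing c with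
  | nil => left; simp [pvRunLen]
  | cons d t ih =>
    by_cases h : d = c
    · subst h
      rw [show pvRunLen d (d :: t) = pvRunLen d t + 1 from by simp [pvRunLen],
          show 1 + (pvRunLen d t + 1) = (1 + pvRunLen d t) + 1 by omega]
      simpa using ih d
    · right; exact ⟨d, t, by simp [pvRunLen, h], h⟩

-- the heart of the A side: on a ±-string, A's recursion returns tries + pvMu
lemma pvSolveA_eq (fuel : Nat) (l : List Char) (tries : Int)
    (hpm : ∀ c ∈ l, c = '+' ∨ c = '-') (hf : pvMu l < fuel) :
    pvSolveA fuel l tries = PySem.Int.toStr (tries + (pvMu l : Int)) := by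
  induction fuel generalizing l tries with
  | zero => omega
  | succ fuel ih =>
    by_cases hall : l = List.replicate l.length '+'
    · cases hl : l with
      | nil =>
        subst hl
        rw [pvSolveA_succ_nil]
        norm_num [pvMu, pvRuns]
      | cons a t =>
        subst hl
        have hmu : pvMu (a :: t) = 0 := by
          rw [hall]
          simp [pvMu, pvRuns_replicate, getLast?_replicate_succ]
        rw [pvSolveA_succ, if_pos hall, hmu]
        norm_num
    · cases hl : l with
      | nil => exact absurd (by simp) (hl ▸ hall)
      | cons fpc t =>
        subst hl
        rw [pvSolveA_succ, if_neg hall]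
        set k := pvRunLen fpc t with hk
        have htake := take_runLen fpc t
        have hfpc : fpc = '+' ∨ fpc = '-' := hpm fpc (by simp)
        set c' : Char := if fpc = '-' then '+' else '-' with hc'
        have hflip : ((fpc :: t).take (1 + k)).reverse.map
            (fun x => if x = '-' then '+' else '-') = List.replicate (1 + k) c' := by
          rw [htake, List.reverse_replicate, List.map_replicate]
        have hpm' : c' = '+' ∨ c' = '-' := by
          rcases hfpc with h | h <;> simp [hc', h]
        set rest := (fpc :: t).drop (1 + k) with hrest
        have hsplit : List.replicate (1 + k) fpc ++ rest = fpc :: t := by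
          rw [← htake, hrest, List.take_append_drop]
        have hrmem : ∀ c ∈ rest, c = '+' ∨ c = '-' := by
          intro c hc
          exact hpm c (by rw [← hsplit]; exact List.mem_append_right _ hc)
        have hpmL : ∀ c ∈ List.replicate (1 + k) c' ++ rest, c = '+' ∨ c = '-' := by
          intro c hc
          rcases List.mem_append.mp hc with h | h
          · rw [List.eq_of_mem_replicate h]; exact hpm'
          · exact hrmem c h
        have hone : 1 + k = k + 1 := by omega
        -- pvMu of the new list is pvMu l - 1
        have hmu : pvMu (List.replicate (1 + k) c' ++ rest) + 1 = pvMu (fpc :: t) := by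
          rcases drop_runLen fpc t with hnil | ⟨d, r, hd, hdne⟩
          · -- rest = []: the whole string is one run; it is not all '+', so fpc = '-'
            rw [← hrest] at hnil
            have hfpc' : fpc = '-' := by
              rcases hfpc with h | h
              · exfalso; apply hall
                rw [← hsplit, hnil, List.append_nil, h]
                simp
              · exact h
            have hc'' : c' = '+' := by simp [hc', hfpc']
            rw [hnil, List.append_nil, ← hsplit, hnil, List.append_nil, hc'', hfpc']
            simp [pvMu, hone, pvRuns_replicate, getLast?_replicate_succ]
          · rw [← hrest] at hd
            have hd' : d = c' := by
              rcases hrmem d (by rw [hd]; simp) with h | h <;>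
                rcases hfpc with h2 | h2 <;>
                  simp_all
            rw [hd, ← hsplit, hd]
            have e1 : pvRuns (List.replicate (1 + k) c' ++ d :: r) = pvRuns (d :: r) := by
              rw [hone, pvRuns_replicate_append,
                  show pvRuns (c' :: d :: r) = (if c' ≠ d then 1 else 0) + pvRuns (d :: r)
                    from rfl, if_neg (by simp [hd'])]
              omega
            have e2 : pvRuns (List.replicate (1 + k) fpc ++ d :: r) = 1 + pvRuns (d :: r) := by
              rw [hone, pvRuns_replicate_append,
                  show pvRuns (fpc :: d :: r) = (if fpc ≠ d then 1 else 0) + pvRuns (d :: r)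
                    from rfl, if_pos (by intro h; exact hdne h.symm)]
            have e3 : (List.replicate (1 + k) c' ++ d :: r).getLast? = (d :: r).getLast? :=
              getLast?_append_cons _ d r
            have e4 : (List.replicate (1 + k) fpc ++ d :: r).getLast? = (d :: r).getLast? :=
              getLast?_append_cons _ d r
            simp only [pvMu, e1, e2, e3, e4]
            split <;> omega
        have hlt : pvMu (List.replicate (1 + k) c' ++ rest) < fuel := by omega
        rw [hflip, ih (List.replicate (1 + k) c' ++ rest) (tries + 1) hpmL hlt]
        congr 1
        have hcast : (pvMu (List.replicate (1 + k) c' ++ rest) : Int) + 1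
            = (pvMu (fpc :: t) : Int) := by exact_mod_cast congrArg (Nat.cast : ℕ → ℤ) hmu
        omega

-- ===== B-side lemmas =====

lemma destTail_length (t : List Char) : ∀ a, (pvDestTail a t).length = pvRuns (a :: t) := by
  induction t with
  | nil => intro a; simp [pvDestTail, pvRuns]
  | cons c t ih =>
    intro a
    by_cases h : a = c
    · subst h
      simp only [pvDestTail, ne_eq, not_true_eq_false, if_neg, ite_false]
      rw [ih a, show pvRuns (a :: a :: t) = (if a ≠ a then 1 else 0) + pvRuns (a :: t) from rfl]
      simp
    · simp only [pvDestTail, ne_eq, h, not_false_eq_true, if_pos, ite_true, List.length_cons]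
      rw [ih c, show pvRuns (a :: c :: t) = (if a ≠ c then 1 else 0) + pvRuns (c :: t) from rfl,
          if_pos h]
      omega

lemma destTail_getLast? (t : List Char) :
    ∀ a, (a :: pvDestTail a t).getLast? = (a :: t).getLast? := by
  induction t with
  | nil => intro a; simp [pvDestTail]
  | cons c t ih =>
    intro a
    by_cases h : a = c
    · subst h
      simp only [pvDestTail, ne_eq, not_true_eq_false, ite_false]
      rw [ih a, List.getLast?_cons_cons]
    · simp only [pvDestTail, ne_eq, h, not_false_eq_true, ite_true]
      rw [List.getLast?_cons_cons, ih c, List.getLast?_cons_cons]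

lemma destTail_mem (t : List Char) : ∀ a x, x ∈ pvDestTail a t → x ∈ t := by
  induction t with
  | nil => intro a x h; simp [pvDestTail] at h
  | cons c t ih =>
    intro a x h
    by_cases hac : a = c
    · subst hac
      simp only [pvDestTail, ne_eq, not_true_eq_false, ite_false] at h
      exact List.mem_cons_of_mem _ (ih a x h)
    · simp only [pvDestTail, ne_eq, hac, not_false_eq_true, ite_true] at h
      rcases List.mem_cons.mp h with rfl | h'
      · simp
      · exact List.mem_cons_of_mem _ (ih c x h')

lemma destTail_alt (t : List Char) : ∀ a, pvAlt a (pvDestTail a t) := by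
  induction t with
  | nil => intro a; simp [pvDestTail, pvAlt]
  | cons c t ih =>
    intro a
    by_cases h : a = c
    · subst h
      simpa [pvDestTail] using ih a
    · simp only [pvDestTail, ne_eq, h, not_false_eq_true, ite_true]
      exact (pvAlt_cons _ _ _).mpr ⟨h, ih c⟩

lemma destTail_skip_replicate (k : ℕ) (c : Char) (r : List Char) :
    pvDestTail c (List.replicate k c ++ r) = pvDestTail c r := by
  induction k with
  | zero => simp
  | succ k ih => simp [List.replicate_succ, pvDestTail, ih]

-- the B loop on an alternating ±-tail: it adds exactly the remaining run count,
-- plus one when the final run shows '-'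
lemma flipLoop_eq (T : List Char) : ∀ (fuel i flips : Nat) (cur : Char) (runs : List Char),
    T.length + 1 < fuel → i + 1 ≤ runs.length → runs.drop (i + 1) = T →
    (cur = '+' ∨ cur = '-') → (∀ x ∈ T, x = '+' ∨ x = '-') → pvAlt cur T →
    pvFlipLoop fuel runs i cur flips
      = flips + T.length + (if (cur :: T).getLast? = some '-' then 1 else 0) := by
  induction T with
  | nil =>
    intro fuel i flips cur runs hfuel hi hdrop hcur _ _
    have hlen : runs.length = i + 1 := by
      have := congrArg List.length hdrop
      simp [List.length_drop] at this
      omega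
    have hcond : ¬ i < runs.length - 1 := by omega
    match fuel, hfuel with
    | fuel + 2, _ =>
      rcases hcur with h | h
      · subst h
        simp [pvFlipLoop, hcond]
      · subst h
        rw [show pvFlipLoop (fuel + 1 + 1) runs i '-' flips
              = pvFlipLoop (fuel + 1) runs i '+' (flips + 1) from by
            simp [pvFlipLoop, hcond]]
        simp [pvFlipLoop, hcond]
  | cons d T' ih =>
    intro fuel i flips cur runs hfuel hi hdrop hcur hpm halt
    have hlen : runs.length = i + 1 + (d :: T').length := by
      have := congrArg List.length hdrop
      simp only [List.length_drop, List.length_cons] at this ⊢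
      omega
    have hcond : i < runs.length - 1 := by simp at hlen; omega
    have hget : runs.getD (i + 1) ' ' = d := by
      have h1 : runs[i + 1]? = some d := by
        rw [← List.head?_drop, hdrop]; rfl
      simp [List.getD_eq_getElem?_getD, h1]
    have hdrop' : runs.drop (i + 2) = T' := by
      have : runs.drop (i + 2) = (runs.drop (i + 1)).drop 1 := by
        rw [List.drop_drop]
      rw [this, hdrop]
      rfl
    have hd : d = '+' ∨ d = '-' := hpm d (by simp)
    have hne : cur ≠ d := ((pvAlt_cons _ _ _).mp halt).1
    have halt' : pvAlt d T' := ((pvAlt_cons _ _ _).mp halt).2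
    have hdflip : d = (if cur = '-' then '+' else '-') := by
      rcases hcur with h | h <;> rcases hd with h2 | h2 <;> subst h <;> subst h2 <;>
        first | rfl | exact absurd rfl hne
    match fuel, hfuel with
    | fuel + 1, hfuel =>
      rw [show pvFlipLoop (fuel + 1) runs i cur flips
            = pvFlipLoop fuel runs (i + 1) (runs.getD (i + 1) ' ') (flips + 1) from by
          rw [pvFlipLoop]
          rw [if_pos (Or.inl hcond), if_pos ⟨hcond, by rw [hget, ← hdflip]⟩]]
      rw [hget, ih fuel (i + 1) (flips + 1) d runs
            (by simp only [List.length_cons] at hfuel ⊢; omega)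
            (by omega) hdrop' hd (fun x hx => hpm x (List.mem_cons_of_mem _ hx)) halt',
          List.getLast?_cons_cons]
      simp only [List.length_cons]
      omega

-- ===== VERDICT (by name: the statement is the Claim_ definition above) =====
theorem solve_spec : Claim_equal_solve := by
  intro cakes tries _ hpre
  show solve cakes tries = solve_alt cakes tries
  unfold Pre_solve at hpre
  cases hl : cakes.toList with
  | nil =>
    unfold solve solve_alt
    rw [hl]
    rw [show ([] : List Char).length + 2 = 1 + 1 from rfl, pvSolveA_succ_nil]
    simp [pvRunsOf, pvFlipLoop]
  | cons c t =>
    rw [hl] at hpre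
    simp only [List.headD_cons, List.drop_one, List.tail_cons] at hpre
    by_cases hc : c = '+' ∨ c = '-'
    · -- the whole string is a ±-string
      have hpm : ∀ x ∈ cakes.toList, x = '+' ∨ x = '-' := by
        rw [hl]
        intro x hx
        rcases List.mem_cons.mp hx with rfl | hx'
        · exact hc
        · rw [← List.takeWhile_append_dropWhile (p := pvIsRun c) (l := t)] at hx'
          rcases List.mem_append.mp hx' with h | h
          · have := List.mem_takeWhile_imp h
            simp [pvIsRun] at this
            exact this ▸ hc
          · simpa using List.all_eq_true.mp hpre x h
      unfold solve
      rw [pvSolveA_eq (cakes.toList.length + 2) cakes.toList tries hpm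
            (by have := pvMu_le cakes.toList; omega)]
      -- B: the loop over runs computes the same pvMu
      unfold solve_alt
      rw [hl]
      simp only [pvRunsOf, List.headD_cons]
      rw [flipLoop_eq (pvDestTail c t) _ 0 0 c (c :: pvDestTail c t)
            (by simp [destTail_length]; have := pvRuns_le c t; omega)
            (by simp) (by simp) hc
            (fun x hx => hpm x (by rw [hl]; exact List.mem_cons_of_mem _ (destTail_mem t c x hx)))
            (destTail_alt t c)]
      rw [destTail_length, destTail_getLast? t c]
      congr 2
      simp only [pvMu]
      omega
    · -- alien first run: A flips it to '-'s and proceeds on a ±-string; B walks the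
      -- same runs, spending the same flips
      have hcp : c ≠ '+' := fun h => hc (Or.inl h)
      have hcm : c ≠ '-' := fun h => hc (Or.inr h)
      set k := pvRunLen c t with hk
      have hdw : t.dropWhile (pvIsRun c) = t.drop k := dropWhile_eq_drop_runLen c t
      rw [hdw] at hpre
      -- unfold one step of A
      unfold solve
      rw [hl]
      rw [show (c :: t).length + 2 = ((c :: t).length + 1) + 1 from rfl, pvSolveA_succ]
      rw [if_neg (by
        intro h
        apply hcp
        have := congrArg List.head? h
        simpa [List.replicate_succ] using this)]
      have htake := take_runLen c t
      have hflip : ((c :: t).take (1 + k)).reverse.map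
          (fun x => if x = '-' then '+' else '-') = List.replicate (1 + k) '-' := by
        rw [← hk] at htake
        rw [htake, List.reverse_replicate, List.map_replicate, if_neg hcm]
      have hone : 1 + k = k + 1 := by omega
      have hklen : k ≤ t.length := hk ▸ pvRunLen_le c t
      -- B's runs list: the alien head run, then the runs of the ± suffix
      have htsplit : t = List.replicate k c ++ t.drop k := by
        have : List.replicate k c = t.take k := by
          have h2 := take_runLen c t
          rw [← hk, hone] at h2
          rw [List.take_succ_cons] at h2
          have := congrArg List.tail h2
          simpa [List.replicate_succ] using this.symm
        rw [this, List.take_append_drop]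
      have hruns : pvDestTail c t = pvDestTail c (t.drop k) := by
        conv_lhs => rw [htsplit]
        exact destTail_skip_replicate k c (t.drop k)
      unfold solve_alt
      rw [hl]
      simp only [pvRunsOf, List.headD_cons]
      rcases hsuf : t.drop k with _ | ⟨h, r'⟩
      · -- the whole string is the alien run: A needs two flips, and so does B
        rw [hsuf] at hpre
        have hdrop : (c :: t).drop (1 + k) = [] := by
          rw [hone, List.drop_succ_cons, hsuf]
        rw [hflip, hdrop, List.append_nil]
        rw [pvSolveA_eq ((c :: t).length + 1) (List.replicate (1 + k) '-') (tries + 1)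
              (fun x hx => Or.inr (List.eq_of_mem_replicate hx))
              (by have := pvMu_le (List.replicate (1 + k) '-'); simp at this ⊢; omega)]
        have hmu2 : pvMu (List.replicate (1 + k) '-') = 1 := by
          unfold pvMu
          rw [hone, pvRuns_replicate, getLast?_replicate_succ]
          simp
        rw [hmu2, hruns, hsuf]
        simp only [pvDestTail]
        rw [show pvFlipLoop (2 * ([c] : List Char).length + 2) [c] 0 c 0 = 2 from by
          simp [pvFlipLoop, hcp, hcm]]
        push_cast
        ring
      · -- alien run followed by a ± suffix starting with h
        rw [hsuf] at hpre
        have hh : h = '+' ∨ h = '-' := by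
          simpa using List.all_eq_true.mp hpre h (by simp)
        have hrpm : ∀ x ∈ h :: r', x = '+' ∨ x = '-' := by
          intro x hx
          simpa using List.all_eq_true.mp hpre x hx
        have hdrop : (c :: t).drop (1 + k) = h :: r' := by
          rw [hone, List.drop_succ_cons, hsuf]
        rw [hflip, hdrop]
        have hpmM : ∀ x ∈ List.replicate (1 + k) '-' ++ h :: r', x = '+' ∨ x = '-' := by
          intro x hx
          rcases List.mem_append.mp hx with hx | hx
          · right; exact List.eq_of_mem_replicate hx
          · exact hrpm x hx
        have hrlen : k + (r'.length + 1) = t.length := by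
          have := congrArg List.length hsuf
          simp [List.length_drop] at this
          omega
        rw [pvSolveA_eq ((c :: t).length + 1) (List.replicate (1 + k) '-' ++ h :: r') (tries + 1)
              hpmM (by
                have := pvMu_le (List.replicate (1 + k) '-' ++ h :: r')
                simp only [List.length_append, List.length_replicate, List.length_cons] at this
                simp only [List.length_cons]
                omega)]
        -- both sides below are toStr of the same integer; compute each count
        have hch : c ≠ h := by rcases hh with h2 | h2 <;> subst h2 <;> assumption
        have hT : pvDestTail c t = h :: pvDestTail h r' := by
          rw [hruns, hsuf]
          simp [pvDestTail, hch]
        -- A's inner count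
        have eRuns : pvRuns (List.replicate (1 + k) '-' ++ h :: r')
            = (if h = '-' then 0 else 1) + pvRuns (h :: r') := by
          rw [hone, pvRuns_replicate_append,
              show pvRuns ('-' :: h :: r') = (if ('-' : Char) ≠ h then 1 else 0)
                + pvRuns (h :: r') from rfl]
          rcases hh with h2 | h2 <;> subst h2 <;> simp
        have eLast : (List.replicate (1 + k) '-' ++ h :: r').getLast? = (h :: r').getLast? :=
          getLast?_append_cons _ h r'
        -- B's loop: first iteration flips the alien run to the '-' side
        have hlen2 : (c :: h :: pvDestTail h r').length = 2 + (pvDestTail h r').length := by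
          simp; omega
        have hTpm : ∀ x ∈ pvDestTail h r', x = '+' ∨ x = '-' :=
          fun x hx => hrpm x (List.mem_cons_of_mem _ (destTail_mem r' h x hx))
        have hTalt : pvAlt h (pvDestTail h r') := destTail_alt r' h
        have hTlen : (pvDestTail h r').length = pvRuns (h :: r') := destTail_length r' h
        have hTlast : (h :: pvDestTail h r').getLast? = (h :: r').getLast? :=
          destTail_getLast? r' h
        rw [hT]
        set runs : List Char := c :: h :: pvDestTail h r' with hrunsdef
        have hgd : runs.getD 1 ' ' = h := rfl
        have hcnd : 0 < runs.length - 1 := by simp [hrunsdef]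
        have hB : pvFlipLoop (2 * runs.length + 2) runs 0 c 0
            = (if h = '-' then 0 else 1) + 1 + pvRuns (h :: r')
              + (if (h :: r').getLast? = some '-' then 1 else 0) := by
          have hfuel1 : 2 * runs.length + 2 = (2 * runs.length + 1) + 1 := rfl
          rw [hfuel1, pvFlipLoop]
          rw [if_pos (Or.inr hcp)]
          simp only [if_neg hcm, hgd, hcnd, true_and]
          rcases hh with h2 | h2
          · -- next run is '+': no merge; the loop continues from the '-' side
            subst h2
            rw [if_neg (by simp)]
            rw [flipLoop_eq ('+' :: pvDestTail '+' r') _ 0 1 '-' runs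
                  (by
                    simp only [List.length_cons, hrunsdef]
                    have := pvRuns_le '+' r'
                    simp only [List.length_cons] at *
                    omega)
                  (by simp [hrunsdef]) (by simp [hrunsdef]) (Or.inr rfl)
                  (fun x hx => by
                    rcases List.mem_cons.mp hx with rfl | hx'
                    · exact Or.inl rfl
                    · exact hTpm x hx')
                  ((pvAlt_cons _ _ _).mpr ⟨by simp, hTalt⟩)]
            rw [List.getLast?_cons_cons, hTlast]
            simp [List.length_cons, hTlen]
            omega
          · -- next run is '-': the flipped alien run merges into it
            subst h2
            rw [if_pos rfl]
            rw [flipLoop_eq (pvDestTail '-' r') _ 1 1 '-' runs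
                  (by
                    simp only [List.length_cons, hrunsdef]
                    have := pvRuns_le '-' r'
                    rw [hTlen]
                    simp only [List.length_cons] at *
                    omega)
                  (by simp [hrunsdef]) (by simp [hrunsdef]) (Or.inr rfl) hTpm hTalt]
            rw [hTlast]
            rw [hTlen]
            simp
        rw [hB]
        simp only [pvMu]
        rw [eRuns, eLast]
        congr 1
        rcases hh with h2 | h2 <;> subst h2 <;> simp <;> push_cast <;> ring
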